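-- pv_equiv track=rewrite | github.com/daniel-reich/ubiquitous-fiesta | FmowTJecDKQMRqsHS_2.py | crop_hydrated
-- ===== SOURCE A (Python) =====
-- def crop_hydrated(field):
--   field2 = []
--   for r in range(len(field)):
--     for c in range(len(field[0])):
--       watered = False
--       for i in [-1, 0, 1]:
--         for j in [-1, 0, 1]:
--           x = min(max(0, r+i), len(field)-1)
--           y = min(max(0, c+j), len(field[0])-1)
--           if field[x][y] == 'w':
--             watered = True
--       field2 += [watered]
--   return all(field2)
-- ===== SOURCE B (Python) =====
-- def crop_hydrated(field):
--   rows = len(field)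
--   cols = len(field[0]) if field else 0
--   watered = [(r, c) for r in range(rows) for c in range(cols) if field[r][c] == 'w']
--   covered = set()
--   for (x, y) in watered:
--     for nx in range(max(0, x - 1), min(rows, x + 2)):
--       for ny in range(max(0, y - 1), min(cols, y + 2)):
--         covered.add((nx, ny))
--   return all((r, c) in covered for r in range(rows) for c in range(cols))
-- ===== Notes on version B (the rewrite author's own statement) =====
-- stated objective: faster
-- what changed: Replaces A's per-cell clamped 3x3 neighbor scan (and its quadratic 'field2 += [..]' list building) by a single scatter pass: collect watered coordinates, dilate them into a coverage set, then check every rectangle cell is covered by a set lookup.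
import Mathlib
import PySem

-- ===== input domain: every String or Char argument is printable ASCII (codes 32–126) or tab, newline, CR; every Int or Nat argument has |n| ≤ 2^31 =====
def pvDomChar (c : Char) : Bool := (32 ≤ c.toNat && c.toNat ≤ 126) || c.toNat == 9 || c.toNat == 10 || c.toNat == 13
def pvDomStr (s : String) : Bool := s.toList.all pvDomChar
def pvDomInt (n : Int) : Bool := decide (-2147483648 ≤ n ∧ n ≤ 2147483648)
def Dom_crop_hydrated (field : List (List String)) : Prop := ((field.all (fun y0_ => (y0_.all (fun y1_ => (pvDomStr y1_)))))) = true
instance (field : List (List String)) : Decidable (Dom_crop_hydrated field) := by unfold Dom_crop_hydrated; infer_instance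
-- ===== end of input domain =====

-- B replaces A's per-cell 3×3 clamped neighbor scan (with its quadratic 'field2 += [..]'
-- list building) by one scatter pass: collect watered coordinates, dilate them into a
-- coverage set, and check every cell is covered (measured faster in a timing run).

-- ===== PORT A =====
-- field[x][y] is ported as getD with defaults; under Pre_ every such access is in range
-- (exactly where the Python does not raise IndexError), so the port is exact there.
-- the body of A's two inner offset loops computing 'watered' for cell (r, c)
def pvWatA (field : List (List String)) (r c : Nat) : Bool :=
  ([-1, 0, 1] : List Int).foldl (fun w i =>
    ([-1, 0, 1] : List Int).foldl (fun w j =>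
      let x := min (max 0 ((r : Int) + i)) ((field.length : Int) - 1)
      let y := min (max 0 ((c : Int) + j)) (((field.headD []).length : Int) - 1)
      if (field.getD x.toNat []).getD y.toNat "" == "w" then true else w) w) false

def crop_hydrated (field : List (List String)) : Bool :=
  let field2 : List Bool :=
    (List.range field.length).foldl (fun acc (r : Nat) =>
      (List.range (field.headD []).length).foldl (fun acc (c : Nat) =>
        acc ++ [pvWatA field r c]) acc) ([] : List Bool)
  field2.all id

-- ===== PORT B =====
def crop_hydrated_alt (field : List (List String)) : Bool :=
  let rows := field.length
  let cols := (field.headD []).length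
  let watered : List (Nat × Nat) :=
    (List.range rows).flatMap (fun r =>
      (List.range cols).filterMap (fun c =>
        if (field.getD r []).getD c "" == "w" then some (r, c) else none))
  let covered : PySem.Set (Nat × Nat) :=
    watered.foldl (fun s p =>
      (List.range' (p.1 - 1) (min rows (p.1 + 2) - (p.1 - 1))).foldl (fun s nx =>
        (List.range' (p.2 - 1) (min cols (p.2 + 2) - (p.2 - 1))).foldl (fun s ny =>
          PySem.Set.add s (nx, ny)) s) s) PySem.Set.empty
  (List.range rows).all (fun r =>
    (List.range cols).all (fun c => PySem.Set.contains covered (r, c)))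

-- ===== PRECONDITION & SPEC =====
-- Pre_ excludes ragged grids in which some row is shorter than the first row: there the
-- Python A (and B alike) raises IndexError while indexing the rows×len(field[0]) rectangle.
def Pre_crop_hydrated (field : List (List String)) : Prop :=
  ∀ row ∈ field, (field.headD []).length ≤ row.length
instance (field : List (List String)) : Decidable (Pre_crop_hydrated field) := by
  unfold Pre_crop_hydrated; infer_instance
def pvWitness_crop_hydrated : List (List String) := [["w", "x"], ["x", "x"]]
def Spec_crop_hydrated (field : List (List String)) (out : Bool) : Prop := out = crop_hydrated_alt field
instance (field : List (List String)) (out : Bool) : Decidable (Spec_crop_hydrated field out) := by unfold Spec_crop_hydrated; infer_instance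

-- ===== CLAIM (what is proved, stated in full; the proofs are below) =====
def Claim_equal_crop_hydrated : Prop := ∀ (field : List (List String)), Dom_crop_hydrated field → Pre_crop_hydrated field → Spec_crop_hydrated field (crop_hydrated field)

-- ===== LEMMAS AND PROOFS =====

-- membership in a fold of Set-building steps, one level at a time
theorem pv_mem_foldl_set {α β : Type} [BEq β] [LawfulBEq β]
    (l : List α) (F : PySem.Set β → α → PySem.Set β) (P : α → β → Prop)
    (hF : ∀ s x y, y ∈ F s x ↔ y ∈ s ∨ P x y) :
    ∀ (s : PySem.Set β) (y : β), y ∈ l.foldl F s ↔ y ∈ s ∨ ∃ x ∈ l, P x y := by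
  induction l with
  | nil => simp
  | cons a t ih =>
    intro s y
    simp only [List.foldl_cons, ih, hF, List.mem_cons]
    constructor
    · rintro ((h | h) | ⟨x, hx, hP⟩)
      · exact Or.inl h
      · exact Or.inr ⟨a, Or.inl rfl, h⟩
      · exact Or.inr ⟨x, Or.inr hx, hP⟩
    · rintro (h | ⟨x, (rfl | hx), hP⟩)
      · exact Or.inl (Or.inl h)
      · exact Or.inl (Or.inr hP)
      · exact Or.inr ⟨x, hx, hP⟩

-- the 3×3 literal double fold of A is an existential over the offset lists
theorem pv_foldl33 (p : Int → Int → Bool) :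
    (([-1, 0, 1] : List Int).foldl (fun w i =>
      ([-1, 0, 1] : List Int).foldl (fun w j => if p i j then true else w) w) false) = true ↔
    ∃ i ∈ ([-1, 0, 1] : List Int), ∃ j ∈ ([-1, 0, 1] : List Int), p i j = true := by
  simp only [List.foldl_cons, List.foldl_nil, List.mem_cons, List.not_mem_nil]
  constructor
  · intro h
    by_cases h11 : p (-1) (-1) = true
    · exact ⟨-1, by tauto, -1, by tauto, h11⟩
    all_goals (
      by_cases h12 : p (-1) 0 = true
      · exact ⟨-1, by tauto, 0, by tauto, h12⟩
      by_cases h13 : p (-1) 1 = true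
      · exact ⟨-1, by tauto, 1, by tauto, h13⟩
      by_cases h21 : p 0 (-1) = true
      · exact ⟨0, by tauto, -1, by tauto, h21⟩
      by_cases h22 : p 0 0 = true
      · exact ⟨0, by tauto, 0, by tauto, h22⟩
      by_cases h23 : p 0 1 = true
      · exact ⟨0, by tauto, 1, by tauto, h23⟩
      by_cases h31 : p 1 (-1) = true
      · exact ⟨1, by tauto, -1, by tauto, h31⟩
      by_cases h32 : p 1 0 = true
      · exact ⟨1, by tauto, 0, by tauto, h32⟩
      by_cases h33 : p 1 1 = true
      · exact ⟨1, by tauto, 1, by tauto, h33⟩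
      simp [h11, h12, h13, h21, h22, h23, h31, h32, h33] at h)
  · rintro ⟨i, hi, j, hj, hp⟩
    simp only [or_false] at hi hj
    rcases hi with rfl | rfl | rfl <;> rcases hj with rfl | rfl | rfl <;> simp [hp]

-- membership in a half-open Nat range around x, for x < N
theorem pv_mem_nbr (N x q : Nat) (hx : x < N) :
    q ∈ List.range' (x - 1) (min N (x + 2) - (x - 1)) ↔ q < N ∧ x ≤ q + 1 ∧ q ≤ x + 1 := by
  simp only [List.mem_range'_1]
  omega

-- the clamped 3×3 offsets of r reach exactly the in-bounds cells at distance ≤ 1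
theorem pv_clamp (R r x : Nat) (hr : r < R) :
    (∃ i ∈ ([-1, 0, 1] : List Int), (min (max 0 ((r : Int) + i)) ((R : Int) - 1)).toNat = x) ↔
    x < R ∧ x ≤ r + 1 ∧ r ≤ x + 1 := by
  constructor
  · rintro ⟨i, hi, rfl⟩
    simp only [List.mem_cons, List.not_mem_nil, or_false] at hi
    rcases hi with rfl | rfl | rfl <;> omega
  · rintro ⟨h1, h2, h3⟩
    refine ⟨(x : Int) - r, ?_, by omega⟩
    simp only [List.mem_cons, List.not_mem_nil, or_false]
    omega

-- the watered list of B is exactly the in-rectangle coordinates holding "w"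
theorem pv_mem_watered (field : List (List String)) (x y : Nat) :
    (x, y) ∈ (List.range field.length).flatMap (fun r =>
        (List.range (field.headD []).length).filterMap (fun c =>
          if (field.getD r []).getD c "" == "w" then some (r, c) else none)) ↔
      x < field.length ∧ y < (field.headD []).length ∧
        (field.getD x []).getD y "" = "w" := by
  simp only [List.mem_flatMap, List.mem_filterMap, List.mem_range]
  constructor
  · rintro ⟨r, hr, c, hc, heq⟩
    split at heq
    · next h =>
      simp only [Option.some.injEq, Prod.mk.injEq] at heq
      obtain ⟨rfl, rfl⟩ := heq
      exact ⟨hr, hc, eq_of_beq h⟩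
    · exact absurd heq (by simp)
  · rintro ⟨hx, hy, h⟩
    exact ⟨x, hx, y, hy, by simp only [h]; simp⟩

-- membership in B's covered set
theorem pv_mem_covered (rows cols : Nat) (l : List (Nat × Nat)) (q : Nat × Nat) :
    q ∈ l.foldl (fun s p =>
        (List.range' (p.1 - 1) (min rows (p.1 + 2) - (p.1 - 1))).foldl (fun s nx =>
          (List.range' (p.2 - 1) (min cols (p.2 + 2) - (p.2 - 1))).foldl (fun s ny =>
            PySem.Set.add s (nx, ny)) s) s) (PySem.Set.empty : PySem.Set (Nat × Nat)) ↔
    ∃ p ∈ l, q.1 ∈ List.range' (p.1 - 1) (min rows (p.1 + 2) - (p.1 - 1)) ∧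
             q.2 ∈ List.range' (p.2 - 1) (min cols (p.2 + 2) - (p.2 - 1)) := by
  have hmid : ∀ (s : PySem.Set (Nat × Nat)) (p q : Nat × Nat),
      q ∈ (List.range' (p.1 - 1) (min rows (p.1 + 2) - (p.1 - 1))).foldl (fun s nx =>
            (List.range' (p.2 - 1) (min cols (p.2 + 2) - (p.2 - 1))).foldl (fun s ny =>
              PySem.Set.add s (nx, ny)) s) s ↔
      q ∈ s ∨ (q.1 ∈ List.range' (p.1 - 1) (min rows (p.1 + 2) - (p.1 - 1)) ∧
               q.2 ∈ List.range' (p.2 - 1) (min cols (p.2 + 2) - (p.2 - 1))) := by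
    intro s p q
    have hin : ∀ (nx : Nat) (s' : PySem.Set (Nat × Nat)) (y : Nat × Nat),
        y ∈ (List.range' (p.2 - 1) (min cols (p.2 + 2) - (p.2 - 1))).foldl
              (fun s ny => PySem.Set.add s (nx, ny)) s' ↔
        y ∈ s' ∨ ∃ ny ∈ List.range' (p.2 - 1) (min cols (p.2 + 2) - (p.2 - 1)), y = (nx, ny) :=
      fun nx =>
        pv_mem_foldl_set _ _ (fun ny y => y = (nx, ny))
          (fun s'' ny y => by exact PySem.Set.mem_add s'' (nx, ny) y)
    rw [pv_mem_foldl_set _ _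
          (fun nx y => ∃ ny ∈ List.range' (p.2 - 1) (min cols (p.2 + 2) - (p.2 - 1)), y = (nx, ny))
          (fun s' nx y => hin nx s' y) s q]
    constructor
    · rintro (h | ⟨nx, hnx, ny, hny, rfl⟩)
      · exact Or.inl h
      · exact Or.inr ⟨hnx, hny⟩
    · rintro (h | ⟨h1, h2⟩)
      · exact Or.inl h
      · exact Or.inr ⟨q.1, h1, q.2, h2, Prod.mk.eta.symm⟩
  rw [pv_mem_foldl_set _ _
        (fun p q => q.1 ∈ List.range' (p.1 - 1) (min rows (p.1 + 2) - (p.1 - 1)) ∧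
                    q.2 ∈ List.range' (p.2 - 1) (min cols (p.2 + 2) - (p.2 - 1)))
        (fun s p q => hmid s p q) _ q]
  simp [PySem.Set.empty]

-- A's per-cell flag, characterised as an existential over the offset lists
theorem pvWatA_iff (field : List (List String)) (r c : Nat) :
    pvWatA field r c = true ↔
    ∃ i ∈ ([-1, 0, 1] : List Int), ∃ j ∈ ([-1, 0, 1] : List Int),
      ((field.getD (min (max 0 ((r : Int) + i)) ((field.length : Int) - 1)).toNat []).getD
         (min (max 0 ((c : Int) + j)) (((field.headD []).length : Int) - 1)).toNat "" == "w") = true := by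
  unfold pvWatA
  exact pv_foldl33 _

-- per-cell equivalence: A's clamped 3×3 flag vs B's coverage by a watered cell
theorem pv_cell (field : List (List String)) (r c : Nat)
    (hr : r < field.length) (hc : c < (field.headD []).length) :
    pvWatA field r c = true ↔
    ∃ p ∈ (List.range field.length).flatMap (fun r =>
        (List.range (field.headD []).length).filterMap (fun c =>
          if (field.getD r []).getD c "" == "w" then some (r, c) else none)),
      r ∈ List.range' (p.1 - 1) (min field.length (p.1 + 2) - (p.1 - 1)) ∧
      c ∈ List.range' (p.2 - 1) (min (field.headD []).length (p.2 + 2) - (p.2 - 1)) := by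
  rw [pvWatA_iff]
  constructor
  · rintro ⟨i, hi, j, hj, hp⟩
    have hx := (pv_clamp field.length r _ hr).1 ⟨i, hi, rfl⟩
    have hy := (pv_clamp (field.headD []).length c _ hc).1 ⟨j, hj, rfl⟩
    refine ⟨((min (max 0 ((r : Int) + i)) ((field.length : Int) - 1)).toNat,
             (min (max 0 ((c : Int) + j)) (((field.headD []).length : Int) - 1)).toNat),
            (pv_mem_watered field _ _).2 ⟨hx.1, hy.1, eq_of_beq hp⟩, ?_, ?_⟩
    · exact (pv_mem_nbr field.length _ r hx.1).2 ⟨hr, by omega, by omega⟩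
    · exact (pv_mem_nbr (field.headD []).length _ c hy.1).2 ⟨hc, by omega, by omega⟩
  · rintro ⟨⟨x, y⟩, hpmem, hrx, hcy⟩
    obtain ⟨hxR, hyC, hval⟩ := (pv_mem_watered field x y).1 hpmem
    have hrx' := (pv_mem_nbr field.length x r hxR).1 hrx
    have hcy' := (pv_mem_nbr (field.headD []).length y c hyC).1 hcy
    obtain ⟨i, hi, hix⟩ := (pv_clamp field.length r x hr).2 ⟨hxR, by omega, by omega⟩
    obtain ⟨j, hj, hjy⟩ := (pv_clamp (field.headD []).length c y hc).2 ⟨hyC, by omega, by omega⟩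
    exact ⟨i, hi, j, hj, by rw [hix, hjy]; exact beq_iff_eq.2 hval⟩

theorem crop_hydrated_spec : Claim_equal_crop_hydrated := by
  intro field _ _
  unfold Spec_crop_hydrated crop_hydrated crop_hydrated_alt
  rw [Bool.eq_iff_iff]
  simp only [PySem.List.foldl_append_singleton_eq_map, PySem.List.foldl_append_eq_flatMap,
    List.nil_append, List.all_eq_true, id_eq, List.mem_range,
    PySem.Set.contains_iff, pv_mem_covered]
  constructor
  · intro hA r hr c hc
    exact (pv_cell field r c hr hc).1
      (hA _ (List.mem_flatMap.2 ⟨r, List.mem_range.2 hr,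
        List.mem_map.2 ⟨c, List.mem_range.2 hc, rfl⟩⟩))
  · intro hB b hb
    obtain ⟨r, hr, hb2⟩ := List.mem_flatMap.1 hb
    obtain ⟨c, hc, rfl⟩ := List.mem_map.1 hb2
    exact (pv_cell field r c (List.mem_range.1 hr) (List.mem_range.1 hc)).2
      (hB r (List.mem_range.1 hr) c (List.mem_range.1 hc))
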